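-- pv_equiv track=rewrite | github.com/phatakshaunak/scaler_academy | DSA/GCD/delete_one.py | solve
-- ===== SOURCE A (Python) =====
-- def solve(A):
--
--     def gcd(a,b):
--         while a > 0 and b > 0:
--             if a >= b:
--                 a = a % b
--             else:
--                 b = b % a
--         if a == 0:
--             return b
--         else:
--             return a
--
--     N = len(A)
--
--     pre, suff = [0]*(N+1), [0]*(N+1)
--
--     for i in range(N):
--
--         pre[i+1] = gcd(pre[i],A[i])
--
--         suff[N-i-1] = gcd(suff[N-i],A[N-i-1])
--
--     max_val = -1
--
--     for i in range(N):
--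
--         curr_gcd = gcd(pre[i], suff[i+1])
--         max_val = max(curr_gcd, max_val)
--
--     return max_val
-- ===== SOURCE B (Python) =====
-- def solve(A):
--
--     def gcd(a, b):
--         while a > 0 and b > 0:
--             if a >= b:
--                 a = a % b
--             else:
--                 b = b % a
--         if a == 0:
--             return b
--         else:
--             return a
--
--     best = -1
--     for i in range(len(A)):
--         left = 0
--         for x in A[:i]:
--             left = gcd(left, x)
--         right = 0
--         for x in reversed(A[i + 1:]):
--             right = gcd(right, x)
--         cand = gcd(left, right)
--         if cand > best:
--             best = cand
--     return best
-- ===== Notes on version B (the rewrite author's own statement) =====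
-- stated objective: simpler
-- what changed: Drops the pre/suff auxiliary arrays: for each deletion index the remaining elements' gcd is recomputed directly by a left fold over the prefix and a right-to-left fold over the suffix, keeping the same custom gcd.
import Mathlib
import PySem

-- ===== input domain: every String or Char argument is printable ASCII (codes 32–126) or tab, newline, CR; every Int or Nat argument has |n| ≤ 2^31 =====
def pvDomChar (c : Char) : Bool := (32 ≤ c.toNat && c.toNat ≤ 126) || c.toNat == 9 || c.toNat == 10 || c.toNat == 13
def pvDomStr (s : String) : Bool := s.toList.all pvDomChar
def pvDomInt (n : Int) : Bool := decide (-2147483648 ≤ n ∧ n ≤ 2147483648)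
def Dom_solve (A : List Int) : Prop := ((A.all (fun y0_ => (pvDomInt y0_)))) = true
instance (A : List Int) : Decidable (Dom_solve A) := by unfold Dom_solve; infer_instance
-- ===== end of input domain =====

-- B replaces A's prefix/suffix gcd arrays by direct per-index folds over the prefix and the
-- reversed suffix (simpler, no auxiliary arrays; same custom gcd, same left-to-right /
-- right-to-left evaluation order, not faster).

-- the custom gcd helper shared verbatim by A and B (while a>0 and b>0: reduce; then a==0 ? b : a)
def gcdP (a b : Int) : Int :=
  if h : 0 < a ∧ 0 < b then
    (if a ≥ b then gcdP (PySem.Int.mod a b) b else gcdP a (PySem.Int.mod b a))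
  else if a = 0 then b else a
termination_by (a + b).toNat
decreasing_by
  · have h1 := PySem.Int.mod_nonneg a h.2
    have h2 := PySem.Int.mod_lt a h.2
    omega
  · have h1 := PySem.Int.mod_nonneg b h.1
    have h2 := PySem.Int.mod_lt b h.1
    omega

-- ===== PORT A =====
def solve (A : List Int) : Int :=
  let N := A.length
  let ps :=
    (List.range N).foldl
      (fun (ps : List Int × List Int) i =>
        (ps.1.set (i + 1) (gcdP (ps.1.getD i 0) (A.getD i 0)),
         ps.2.set (N - i - 1) (gcdP (ps.2.getD (N - i) 0) (A.getD (N - i - 1) 0))))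
      (List.replicate (N + 1) 0, List.replicate (N + 1) 0)
  (List.range N).foldl
    (fun max_val i => max (gcdP (ps.1.getD i 0) (ps.2.getD (i + 1) 0)) max_val) (-1)

-- ===== PORT B =====
def solve_alt (A : List Int) : Int :=
  (List.range A.length).foldl
    (fun best i =>
      let left := (A.take i).foldl gcdP 0
      let right := ((A.drop (i + 1)).reverse).foldl gcdP 0
      let cand := gcdP left right
      if cand > best then cand else best)
    (-1)

-- ===== PRECONDITION & SPEC =====
def Spec_solve (A : List Int) (out : Int) : Prop := out = solve_alt A
instance (A : List Int) (out : Int) : Decidable (Spec_solve A out) := by unfold Spec_solve; infer_instance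

-- ===== CLAIM (what is proved, stated in full; the proofs are below) =====
def Claim_equal_solve : Prop := ∀ (A : List Int), Dom_solve A → Spec_solve A (solve A)

-- ===== LEMMAS AND PROOFS =====

-- value A's pre[i] should carry / B's `left` at index i
def preVal (A : List Int) (i : Nat) : Int := (A.take i).foldl gcdP 0
-- value A's suff[j] should carry / B's `right` for deletion index j-1
def suffVal (A : List Int) (j : Nat) : Int := ((A.drop j).reverse).foldl gcdP 0

theorem preVal_succ (A : List Int) (i : Nat) (h : i < A.length) :
    preVal A (i + 1) = gcdP (preVal A i) (A.getD i 0) := by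
  unfold preVal
  rw [List.take_add_one, List.getElem?_eq_getElem h, Option.toList_some, List.foldl_append,
    List.foldl_cons, List.foldl_nil, List.getD_eq_getElem A 0 h]

theorem suffVal_pred (A : List Int) (j : Nat) (h : j < A.length) :
    suffVal A j = gcdP (suffVal A (j + 1)) (A.getD j 0) := by
  unfold suffVal
  have : A.drop j = A[j] :: A.drop (j + 1) := List.drop_eq_getElem_cons h
  rw [this, List.reverse_cons, List.foldl_append, List.foldl_cons, List.foldl_nil,
    List.getD_eq_getElem A 0 h]

-- the invariant carried by A's filling loop after k iterations
def InvA (A : List Int) (k : Nat) (ps : List Int × List Int) : Prop :=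
  ps.1.length = A.length + 1 ∧ ps.2.length = A.length + 1 ∧
  (∀ j, j ≤ A.length → ps.1.getD j 0 = if j ≤ k then preVal A j else 0) ∧
  (∀ j, j ≤ A.length → ps.2.getD j 0 = if A.length - k ≤ j then suffVal A j else 0)

theorem getD_set_eq (l : List Int) (i : Nat) (v : Int) (h : i < l.length) :
    (l.set i v).getD i 0 = v := by
  simp [List.getD, h]

theorem getD_set_ne (l : List Int) (i j : Nat) (v : Int) (h : i ≠ j) :
    (l.set i v).getD j 0 = l.getD j 0 := by
  simp [List.getD, List.getElem?_set_ne h]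

theorem inv_step (A : List Int) (k : Nat) (hk : k < A.length) (ps : List Int × List Int)
    (h : InvA A k ps) :
    InvA A (k + 1)
      (ps.1.set (k + 1) (gcdP (ps.1.getD k 0) (A.getD k 0)),
       ps.2.set (A.length - k - 1) (gcdP (ps.2.getD (A.length - k) 0) (A.getD (A.length - k - 1) 0))) := by
  obtain ⟨h1, h2, hp, hs⟩ := h
  refine ⟨by simp [h1], by simp [h2], ?_, ?_⟩
  · intro j hj
    by_cases hjk : j = k + 1
    · subst hjk
      rw [getD_set_eq _ _ _ (by omega)]
      rw [hp k (by omega)]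
      simp [preVal_succ A k hk]
    · rw [getD_set_ne _ _ _ _ (fun e => hjk e.symm), hp j hj]
      split_ifs <;> first | rfl | omega
  · intro j hj
    by_cases hjk : j = A.length - k - 1
    · subst hjk
      rw [getD_set_eq _ _ _ (by omega)]
      rw [hs (A.length - k) (by omega), if_pos (le_refl _), if_pos (by omega)]
      have hlt : A.length - k - 1 < A.length := by omega
      have heq : A.length - k - 1 + 1 = A.length - k := by omega
      rw [suffVal_pred A (A.length - k - 1) hlt, heq]
    · rw [getD_set_ne _ _ _ _ (fun e => hjk e.symm), hs j hj]
      split_ifs <;> first | rfl | omega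

theorem inv_loop (A : List Int) (k : Nat) (hk : k ≤ A.length) :
    InvA A k ((List.range k).foldl
      (fun (ps : List Int × List Int) i =>
        (ps.1.set (i + 1) (gcdP (ps.1.getD i 0) (A.getD i 0)),
         ps.2.set (A.length - i - 1) (gcdP (ps.2.getD (A.length - i) 0) (A.getD (A.length - i - 1) 0))))
      (List.replicate (A.length + 1) 0, List.replicate (A.length + 1) 0)) := by
  induction k with
  | zero =>
      refine ⟨by simp, by simp, ?_, ?_⟩ <;> intro j hj
      · simp only [List.range_zero, List.foldl_nil]
        rcases Nat.eq_zero_or_pos j with h0 | h0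
        · subst h0; simp [preVal, List.getD, Nat.lt_succ_of_le hj]
        · simp [List.getD, Nat.lt_succ_of_le hj, Nat.not_le.mpr h0]
      · simp only [List.range_zero, List.foldl_nil]
        by_cases h0 : A.length ≤ j
        · have : j = A.length := le_antisymm hj h0
          subst this
          simp [suffVal, List.getD]
        · simp [List.getD, Nat.lt_succ_of_le hj, h0]
  | succ n ih =>
      rw [List.range_succ, List.foldl_append, List.foldl_cons, List.foldl_nil]
      exact inv_step A n (by omega) _ (ih (by omega))

-- B's accumulator update (if cand > best then cand else best) is Python's max(cand, best)
theorem max_eq_ite (c b : Int) : max c b = if c > b then c else b := by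
  rcases le_total c b with h | h
  · rcases lt_or_eq_of_le h with h' | h'
    · simp [max_eq_right h, not_lt.mpr h]
    · subst h'; simp [max_self]
  · simp [max_eq_left h]
    omega

theorem second_loop (A : List Int) (ps : List Int × List Int) (h : InvA A A.length ps) :
    (List.range A.length).foldl
      (fun max_val i => max (gcdP (ps.1.getD i 0) (ps.2.getD (i + 1) 0)) max_val) (-1)
    = solve_alt A := by
  obtain ⟨_, _, hp, hs⟩ := h
  unfold solve_alt
  apply PySem.List.foldl_congr_mem
  intro b i hi
  have hi' := List.mem_range.mp hi
  rw [hp i (by omega), hs (i + 1) (by omega)]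
  rw [if_pos (by omega), if_pos (by omega)]
  simp only [preVal, suffVal] at *
  exact max_eq_ite _ b

-- ===== VERDICT (by name: the statement is the Claim_ definition above) =====
theorem solve_spec : Claim_equal_solve := by
  intro A _
  unfold Spec_solve solve
  exact second_loop A _ (inv_loop A A.length le_rfl)
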